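-- pv_equiv track=rewrite | github.com/itsadityasai/rhetorical-framing-auditor | archive/ordering-str/by-cluster-size/train_ordered_dfi.py | order_clusters_by_size
-- ===== SOURCE A (Python) =====
-- from collections import OrderedDict
-- from typing import Callable, Dict, List, Set, Tuple
--
-- def order_clusters_by_size(clusters: Dict, edu_lookup: Dict) -> OrderedDict:
--     """
--     Order clusters by total EDU count (largest first).
--
--     This ensures position 0 always corresponds to the most-mentioned fact
--     across all triplets, making the positional encoding semantically meaningful.
--     """
--     # Calculate size for each cluster
--     cluster_sizes = {}
--     for cluster_id, edus in clusters.items():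
--         cluster_sizes[cluster_id] = len(edus)
--
--     # Sort by size (descending), then by cluster_id for stability
--     sorted_cluster_ids = sorted(
--         clusters.keys(), key=lambda cid: (-cluster_sizes[cid], str(cid))
--     )
--
--     # Build ordered dict
--     ordered = OrderedDict()
--     for cid in sorted_cluster_ids:
--         ordered[cid] = clusters[cid]
--
--     return ordered
-- ===== SOURCE B (Python) =====
-- from collections import OrderedDict
--
--
-- def order_clusters_by_size(clusters, edu_lookup):
--     # Selection by repeated extraction: scan the remaining ids for the
--     # largest cluster (ties broken by the smallest str(cid)), emit it,
--     # drop it from the pool, repeat until the pool is empty.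
--     remaining = list(clusters)
--     ordered = OrderedDict()
--     while remaining:
--         best = remaining[0]
--         for cid in remaining[1:]:
--             if (len(clusters[cid]) > len(clusters[best])
--                     or (len(clusters[cid]) == len(clusters[best])
--                         and str(cid) < str(best))):
--                 best = cid
--         remaining = [c for c in remaining if c != best]
--         ordered[best] = clusters[best]
--     return ordered
-- ===== Notes on version B (the rewrite author's own statement) =====
-- stated objective: alternative
-- what changed: Replaces the single compound-key sort ((-size, str(id))) with selection by repeated extraction: scan the remaining ids for the largest cluster (smallest str(id) on ties), emit it, remove it from the pool, repeat.
import Mathlib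
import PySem

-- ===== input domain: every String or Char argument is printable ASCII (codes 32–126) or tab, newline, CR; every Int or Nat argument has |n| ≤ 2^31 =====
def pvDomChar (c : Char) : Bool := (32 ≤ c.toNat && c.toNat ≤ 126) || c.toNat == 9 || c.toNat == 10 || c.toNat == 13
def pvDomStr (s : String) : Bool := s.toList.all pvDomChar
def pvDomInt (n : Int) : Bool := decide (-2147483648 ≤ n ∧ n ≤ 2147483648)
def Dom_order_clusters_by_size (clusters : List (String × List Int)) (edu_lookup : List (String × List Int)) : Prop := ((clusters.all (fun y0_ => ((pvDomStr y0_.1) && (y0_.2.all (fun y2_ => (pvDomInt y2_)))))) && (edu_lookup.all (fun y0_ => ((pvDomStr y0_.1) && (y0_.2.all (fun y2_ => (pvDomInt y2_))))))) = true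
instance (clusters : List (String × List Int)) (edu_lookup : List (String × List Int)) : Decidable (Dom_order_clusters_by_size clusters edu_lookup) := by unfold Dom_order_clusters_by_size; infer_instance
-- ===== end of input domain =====

-- B replaces A's single compound-key sort by selection: repeatedly scan the remaining ids
-- for the largest cluster (smallest id on ties), emit it and drop it from the pool;
-- alternative algorithm, not claimed faster.

-- ===== PORT A =====
-- The dict parameters arrive as association lists; as in Python they denote dicts (PySem.Dict.ofList).
def order_clusters_by_size (clusters : List (String × List Int)) (edu_lookup : List (String × List Int)) : List (String × List Int) :=
  let d := PySem.Dict.ofList clusters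
  -- cluster_sizes = {}; for cluster_id, edus in clusters.items(): cluster_sizes[cluster_id] = len(edus)
  let cluster_sizes : PySem.Dict String Int :=
    d.items.foldl (fun s p => s.insert p.1 (p.2.length : Int)) PySem.Dict.empty
  -- sorted(clusters.keys(), key=lambda cid: (-cluster_sizes[cid], str(cid))); str(cid) = cid for str keys;
  -- cluster_sizes[cid] is always present (cid ∈ keys), so getD's default is unreachable (no KeyError)
  let sorted_cluster_ids :=
    PySem.List.sorted2 d.keys (fun cid => -(cluster_sizes.getD cid 0)) (fun cid => cid) false
  -- ordered = OrderedDict(); for cid in sorted_cluster_ids: ordered[cid] = clusters[cid] (cid ∈ keys: no KeyError)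
  (sorted_cluster_ids.foldl (fun od cid => od.insert cid (d.getD cid [])) PySem.Dict.empty).items

-- ===== PORT B =====
-- best = remaining[0]; for cid in remaining[1:]: if len(clusters[cid]) > len(clusters[best])
--   or (len(clusters[cid]) == len(clusters[best]) and str(cid) < str(best)): best = cid
-- (str on str keys is the identity; clusters[cid] always hits, so getD's default is unreachable)
def pvScanBest (d : PySem.Dict String (List Int)) (b : String) (l : List String) : String :=
  l.foldl (fun b cid =>
      if (d.getD cid []).length > (d.getD b []).length ∨
         ((d.getD cid []).length = (d.getD b []).length ∧ cid < b)
      then cid else b) b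

-- while remaining: … ; remaining = [c for c in remaining if c != best]
-- (fuel = remaining.length; each pass removes exactly the chosen best, so the fuel is exact)
def pvSelLoop (d : PySem.Dict String (List Int)) :
    Nat → List String → PySem.Dict String (List Int) → PySem.Dict String (List Int)
  | _, [], ordered => ordered
  | 0, _ :: _, ordered => ordered
  | fuel + 1, r0 :: rest, ordered =>
      let best := pvScanBest d r0 rest
      pvSelLoop d fuel ((r0 :: rest).filter (fun c => !(c == best)))
        (ordered.insert best (d.getD best []))

def order_clusters_by_size_alt (clusters : List (String × List Int)) (edu_lookup : List (String × List Int)) : List (String × List Int) :=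
  let d := PySem.Dict.ofList clusters
  -- remaining = list(clusters); ordered = OrderedDict(); while remaining: … ; return ordered
  (pvSelLoop d d.keys.length d.keys PySem.Dict.empty).items

-- ===== PRECONDITION & SPEC =====
def Spec_order_clusters_by_size (clusters : List (String × List Int)) (edu_lookup : List (String × List Int)) (out : List (String × List Int)) : Prop := out = order_clusters_by_size_alt clusters edu_lookup
instance (clusters : List (String × List Int)) (edu_lookup : List (String × List Int)) (out : List (String × List Int)) : Decidable (Spec_order_clusters_by_size clusters edu_lookup out) := by unfold Spec_order_clusters_by_size; infer_instance

-- ===== CLAIM (what is proved, stated in full; the proofs are below) =====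
def Claim_equal_order_clusters_by_size : Prop := ∀ (clusters : List (String × List Int)) (edu_lookup : List (String × List Int)), Dom_order_clusters_by_size clusters edu_lookup → Spec_order_clusters_by_size clusters edu_lookup (order_clusters_by_size clusters edu_lookup)

-- ===== LEMMAS AND PROOFS =====

-- the strict "emitted strictly earlier" order B's scan selects by: bigger cluster, or equal and smaller id
def pvP (d : PySem.Dict String (List Int)) (a b : String) : Prop :=
  (d.getD a []).length > (d.getD b []).length ∨
    ((d.getD a []).length = (d.getD b []).length ∧ a < b)

theorem pvP_irrefl (d : PySem.Dict String (List Int)) (a : String) : ¬ pvP d a a := by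
  unfold pvP
  rintro (h | ⟨_, h⟩)
  · omega
  · exact lt_irrefl _ h

theorem pvP_trans (d : PySem.Dict String (List Int)) {a b c : String}
    (h1 : pvP d a b) (h2 : pvP d b c) : pvP d a c := by
  unfold pvP at *
  rcases h1 with h1 | ⟨e1, l1⟩ <;> rcases h2 with h2 | ⟨e2, l2⟩
  · exact Or.inl (by omega)
  · exact Or.inl (by omega)
  · exact Or.inl (by omega)
  · exact Or.inr ⟨by omega, lt_trans l1 l2⟩

theorem pvP_total (d : PySem.Dict String (List Int)) {a b : String}
    (h : ¬ pvP d a b) : pvP d b a ∨ b = a := by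
  unfold pvP at *
  rcases Nat.lt_trichotomy (d.getD a []).length (d.getD b []).length with hs | hs | hs
  · exact Or.inl (Or.inl hs)
  · rcases lt_trichotomy a b with hl | hl | hl
    · exact absurd (Or.inr ⟨hs, hl⟩) h
    · exact Or.inr hl.symm
    · exact Or.inl (Or.inr ⟨hs.symm, hl⟩)
  · exact absurd (Or.inl hs) h

-- the scan returns a member of the pool that nothing in the pool strictly precedes
theorem pvScanBest_spec (d : PySem.Dict String (List Int)) (l : List String) :
    ∀ b : String, pvScanBest d b l ∈ b :: l ∧ ∀ x ∈ b :: l, ¬ pvP d x (pvScanBest d b l) := by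
  induction l with
  | nil =>
    intro b
    refine ⟨List.mem_cons_self .., ?_⟩
    intro x hx
    rw [List.mem_singleton] at hx
    subst hx
    exact pvP_irrefl d _
  | cons c t ih =>
    intro b
    have hstep : pvScanBest d b (c :: t)
        = pvScanBest d (if (d.getD c []).length > (d.getD b []).length ∨
            ((d.getD c []).length = (d.getD b []).length ∧ c < b) then c else b) t := rfl
    set b' := if (d.getD c []).length > (d.getD b []).length ∨
        ((d.getD c []).length = (d.getD b []).length ∧ c < b) then c else b with hb'
    obtain ⟨hm, hall⟩ := ih b'
    rw [hstep]
    constructor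
    · rcases List.mem_cons.mp hm with h | h
      · rw [h, hb']
        split
        · exact List.mem_cons_of_mem _ (List.mem_cons_self ..)
        · exact List.mem_cons_self ..

      · exact List.mem_cons_of_mem _ (List.mem_cons_of_mem _ h)
    · have hmb' : ¬ pvP d b' (pvScanBest d b' t) := hall b' (List.mem_cons_self ..)
      have hsplit : (pvP d c b ∧ b' = c) ∨ (¬ pvP d c b ∧ b' = b) := by
        by_cases h : pvP d c b
        · exact Or.inl ⟨h, by rw [hb']; exact if_pos (by unfold pvP at h; exact h)⟩
        · exact Or.inr ⟨h, by rw [hb']; exact if_neg (by unfold pvP at h; exact h)⟩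
      intro x hx
      rcases List.mem_cons.mp hx with hxb | hx'
      · rw [hxb]
        rcases hsplit with ⟨h, he⟩ | ⟨h, he⟩
        · rw [he] at hmb' ⊢
          intro hbm
          exact hmb' (pvP_trans d h hbm)
        · rw [he] at hmb' ⊢
          exact hmb'
      · rcases List.mem_cons.mp hx' with hxc | hxt
        · rw [hxc]
          rcases hsplit with ⟨h, he⟩ | ⟨h, he⟩
          · rw [he] at hmb' ⊢
            exact hmb'
          · rw [he] at hmb' ⊢
            rcases pvP_total d h with hbc | hbc
            · intro hcm
              exact hmb' (pvP_trans d hbc hcm)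
            · rw [← hbc]
              exact hmb'
        · exact hall x (List.mem_cons_of_mem _ hxt)

-- proof-only mirror of pvSelLoop recording the emission order of the ids
def pvSelSeq (d : PySem.Dict String (List Int)) : Nat → List String → List String
  | _, [] => []
  | 0, _ :: _ => []
  | fuel + 1, r0 :: rest =>
      let best := pvScanBest d r0 rest
      best :: pvSelSeq d fuel ((r0 :: rest).filter (fun c => !(c == best)))

theorem pvSelLoop_eq_foldl (d : PySem.Dict String (List Int)) :
    ∀ (fuel : Nat) (rem : List String) (od : PySem.Dict String (List Int)),
      pvSelLoop d fuel rem od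
        = (pvSelSeq d fuel rem).foldl (fun od cid => od.insert cid (d.getD cid [])) od := by
  intro fuel
  induction fuel with
  | zero => intro rem od; cases rem <;> rfl
  | succ f ih =>
    intro rem od
    cases rem with
    | nil => rfl
    | cons r0 rest =>
      rw [pvSelLoop, pvSelSeq]
      exact ih _ _

theorem pvSelSeq_spec (d : PySem.Dict String (List Int)) :
    ∀ (fuel : Nat) (rem : List String), rem.Nodup → rem.length = fuel →
      (pvSelSeq d fuel rem).Perm rem ∧ (pvSelSeq d fuel rem).Pairwise (pvP d) := by
  intro fuel
  induction fuel with
  | zero =>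
    intro rem hnd hlen
    rw [List.length_eq_zero_iff] at hlen
    subst hlen
    exact ⟨List.Perm.refl _, List.Pairwise.nil⟩
  | succ f ih =>
    intro rem hnd hlen
    cases rem with
    | nil => simp at hlen
    | cons r0 rest =>
      rw [pvSelSeq]
      set best := pvScanBest d r0 rest with hbest
      obtain ⟨hbm, hball⟩ := pvScanBest_spec d rest r0
      rw [← hbest] at hbm hball
      set rem' := (r0 :: rest).filter (fun c => !(c == best)) with hrem'
      have hfe : rem' = (r0 :: rest).erase best := (hnd.erase_eq_filter best).symm
      have hnd' : rem'.Nodup := hnd.filter _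
      have hlen' : rem'.length = f := by
        rw [hfe, List.length_erase_of_mem hbm]
        simpa using hlen
      obtain ⟨hperm, hpw⟩ := ih rem' hnd' hlen'
      have hpermrem : (best :: pvSelSeq d f rem').Perm (r0 :: rest) := by
        refine List.Perm.trans (List.Perm.cons best hperm) ?_
        rw [hfe]
        exact (List.perm_cons_erase hbm).symm
      refine ⟨hpermrem, List.Pairwise.cons ?_ hpw⟩
      intro x hx
      have hxrem' : x ∈ rem' := hperm.mem_iff.mp hx
      have hxmem : x ∈ r0 :: rest := List.mem_of_mem_filter (hrem' ▸ hxrem')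
      have hxne : x ≠ best := by
        have := List.of_mem_filter (hrem' ▸ hxrem')
        simpa using this
      rcases pvP_total d (hball x hxmem) with h | h
      · exact h
      · exact absurd h.symm hxne

-- inserting x into a filtered sublist of a strictly before-ordered list lands at its unique place
theorem pvInsertBy_filter {α : Type} [DecidableEq α] (before : α → α → Bool) (ys : List α)
    (hpw : ys.Pairwise (fun a b => before a b = true ∧ before b a = false)) (hnd : ys.Nodup)
    (x : α) (hx : x ∈ ys) (p : α → Bool) (hpx : p x = false) :
    PySem.List.insertBy before x (ys.filter p) =
      ys.filter (fun y => p y || decide (y = x)) := by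
  induction ys with
  | nil => cases hx
  | cons y t ih =>
    rw [List.pairwise_cons] at hpw
    obtain ⟨hyt, hpw'⟩ := hpw
    rw [List.nodup_cons] at hnd
    obtain ⟨hyn, hnd'⟩ := hnd
    by_cases hxy : x = y
    · subst hxy
      have hfy : p x = false := hpx
      simp only [List.filter_cons, hfy, Bool.false_or, decide_eq_true_eq]
      rw [if_neg (by simp), if_pos (by simp)]
      have htail : t.filter (fun y => p y || decide (y = x)) = t.filter p := by
        apply List.filter_congr
        intro z hz
        have : z ≠ x := fun h => hyn (h ▸ hz)
        simp [this]
      rw [htail]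
      cases hfil : t.filter p with
      | nil => simp [PySem.List.insertBy]
      | cons z rest =>
        have hz : z ∈ t := List.mem_of_mem_filter (by rw [hfil]; exact List.mem_cons_self ..)
        have := (hyt z hz).1
        rw [PySem.List.insertBy.eq_2, if_pos this]
    · have hxt : x ∈ t := by cases hx with
        | head => exact absurd rfl hxy
        | tail _ h => exact h
      cases hpy : p y with
      | false =>
        have hne : decide (y = x) = false := by simp; exact fun h => hxy h.symm
        simp only [List.filter_cons, hpy, hne, Bool.false_or, Bool.false_eq_true, if_false]
        exact ih hpw' hnd' hxt
      | true =>
        simp only [List.filter_cons, hpy]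
        rw [if_pos (by simp), if_pos (by simp)]
        have hby := (hyt x hxt).2
        rw [PySem.List.insertBy.eq_2, if_neg (by simp [hby])]
        rw [ih hpw' hnd' hxt]

-- insertion of a duplicate-free batch into a filtered sublist, one element at a time
theorem pvFoldlInsertBy_filter {α : Type} [DecidableEq α] (before : α → α → Bool) (ys : List α)
    (hpw : ys.Pairwise (fun a b => before a b = true ∧ before b a = false)) (hnd : ys.Nodup) :
    ∀ (xs : List α) (p : α → Bool), xs.Nodup → (∀ x ∈ xs, x ∈ ys ∧ p x = false) →
      xs.foldl (fun acc x => PySem.List.insertBy before x acc) (ys.filter p) =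
        ys.filter (fun y => p y || decide (y ∈ xs)) := by
  intro xs
  induction xs with
  | nil => intro p _ _; simp
  | cons x xs' ih =>
    intro p hndx hmem
    rw [List.nodup_cons] at hndx
    obtain ⟨hxn, hndx'⟩ := hndx
    have hx := hmem x (List.mem_cons_self ..)
    simp only [List.foldl_cons]
    rw [pvInsertBy_filter before ys hpw hnd x hx.1 p hx.2]
    rw [ih (fun y => p y || decide (y = x)) hndx'
      (fun z hz => ⟨(hmem z (List.mem_cons_of_mem _ hz)).1, by
        have hzx : z ≠ x := fun h => hxn (h ▸ hz)
        simp [hzx, (hmem z (List.mem_cons_of_mem _ hz)).2]⟩)]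
    apply List.filter_congr
    intro y _
    by_cases h1 : y = x <;> by_cases h2 : y ∈ xs' <;> simp [h1, h2]

-- insertion sort of xs is the unique strictly-before-ordered rearrangement ys of xs
theorem pvInsertSort_eq {α : Type} [DecidableEq α] (before : α → α → Bool) (xs ys : List α)
    (hperm : ys.Perm xs)
    (hpw : ys.Pairwise (fun a b => before a b = true ∧ before b a = false))
    (hnd : xs.Nodup) :
    xs.foldl (fun acc x => PySem.List.insertBy before x acc) [] = ys := by
  have h0 : (ys.filter (fun _ => false)) = [] := by simp
  have := pvFoldlInsertBy_filter before ys hpw (hperm.nodup_iff.mpr hnd) xs (fun _ => false) hnd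
    (fun x hx => ⟨hperm.mem_iff.mpr hx, rfl⟩)
  rw [h0] at this
  rw [this]
  rw [List.filter_congr (fun y hy => by simp [hperm.mem_iff.mp hy] : ∀ y ∈ ys, _ = true)]
  exact List.filter_true ..

-- A's size-table lookup = length of the cluster's edu list
theorem pv_cs_getD (d : PySem.Dict String (List Int)) (hknd : d.keys.Nodup)
    {a : String} (ha : a ∈ d.keys) :
    (d.items.foldl (fun s p => s.insert p.1 (p.2.length : Int)) PySem.Dict.empty).getD a 0
      = ((d.getD a []).length : Int) := by
  have hitems : (d.items.foldl (fun s p => s.insert p.1 (p.2.length : Int)) PySem.Dict.empty).items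
      = PySem.Dict.empty.items ++ d.items.map (fun p => (p.1, (p.2.length : Int))) :=
    PySem.Dict.items_foldl_insert_fresh d.items Prod.fst (fun p => ((p.2.length : Int)))
      PySem.Dict.empty (fun a _ => PySem.Dict.contains_empty _) (by
        simpa [PySem.Dict.keys] using hknd)
  obtain ⟨v, hv⟩ : ∃ v, d.get? a = some v := by
    cases hg : d.get? a with
    | none => exact absurd ((PySem.Dict.get?_eq_none_iff_not_mem_keys d a).mp hg) (by simpa using ha)
    | some v => exact ⟨v, rfl⟩
  have hav : (a, v) ∈ d.items := PySem.Dict.mem_items_of_get?_eq_some d hv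
  have hgv : d.getD a [] = v := PySem.Dict.getD_of_get?_eq_some d [] hv
  have hmemcs : (a, (v.length : Int)) ∈
      (d.items.foldl (fun s p => s.insert p.1 (p.2.length : Int)) PySem.Dict.empty).items := by
    rw [hitems]
    refine List.mem_append_right _ ?_
    exact List.mem_map.mpr ⟨(a, v), hav, rfl⟩
  have hcknd : (d.items.foldl (fun s p => s.insert p.1 (p.2.length : Int)) PySem.Dict.empty).keys.Nodup := by
    simp only [PySem.Dict.keys, hitems]
    simpa [List.map_map, Function.comp] using hknd
  rw [PySem.Dict.getD_of_mem_items _ hmemcs hcknd 0, hgv]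

-- the two ports agree on every input
theorem pv_main_eq (clusters edu_lookup : List (String × List Int)) :
    order_clusters_by_size clusters edu_lookup = order_clusters_by_size_alt clusters edu_lookup := by
  unfold order_clusters_by_size order_clusters_by_size_alt
  dsimp only []
  set d := PySem.Dict.ofList clusters with hd
  have hknd : d.keys.Nodup := PySem.Dict.nodup_keys_ofList clusters
  set cs : PySem.Dict String Int :=
    d.items.foldl (fun s p => s.insert p.1 (p.2.length : Int)) PySem.Dict.empty with hcs
  set before : String → String → Bool := fun a b =>
    decide ((fun cid => -(cs.getD cid 0)) a < (fun cid => -(cs.getD cid 0)) b) ||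
      (!decide ((fun cid => -(cs.getD cid 0)) b < (fun cid => -(cs.getD cid 0)) a) &&
        decide ((fun cid => cid) a < (fun cid => cid) b)) with hbef
  have hk1 : ∀ {a : String}, a ∈ d.keys → cs.getD a 0 = ((d.getD a []).length : Int) := by
    intro a ha
    rw [hcs]
    exact pv_cs_getD d hknd ha
  set seq := pvSelSeq d d.keys.length d.keys with hseq
  obtain ⟨hperm, hpw⟩ := pvSelSeq_spec d d.keys.length d.keys hknd rfl
  rw [← hseq] at hperm hpw
  have hids : PySem.List.sorted2 d.keys (fun cid => -(cs.getD cid 0)) (fun cid => cid) false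
      = seq := by
    have hunf : PySem.List.sorted2 d.keys (fun cid => -(cs.getD cid 0)) (fun cid => cid) false
        = d.keys.foldl (fun acc x => PySem.List.insertBy before x acc) [] := by
      rw [PySem.List.sorted2, hbef]
      rfl
    rw [hunf]
    apply pvInsertSort_eq before d.keys seq hperm ?hpw hknd
    case hpw =>
      refine hpw.imp_of_mem ?_
      intro a b ha hb hab
      have hamem : a ∈ d.keys := hperm.mem_iff.mp ha
      have hbmem : b ∈ d.keys := hperm.mem_iff.mp hb
      rw [hbef]
      rcases hab with hgt | ⟨heq, hlt⟩
      · have h1 : -(cs.getD a 0) < -(cs.getD b 0) := by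
          rw [hk1 hamem, hk1 hbmem]
          omega
        constructor
        · simp [h1]
        · simp [h1, not_lt_of_gt h1]
      · have h1 : cs.getD a 0 = cs.getD b 0 := by
          rw [hk1 hamem, hk1 hbmem, heq]
        constructor
        · simp [h1, hlt]
        · simp [h1, not_lt_of_gt hlt]
  rw [hids, pvSelLoop_eq_foldl d d.keys.length d.keys PySem.Dict.empty, ← hseq]

-- ===== VERDICT (by name: the statement is the Claim_ definition above) =====
theorem order_clusters_by_size_spec : Claim_equal_order_clusters_by_size := by
  intro clusters edu_lookup _
  exact pv_main_eq clusters edu_lookup
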